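-- pv_equiv track=rewrite | github.com/stanislavvv/fb2_srv_semipg | app/validate.py | unurl
-- ===== SOURCE A (Python) =====
-- def unurl(string: str):
--     """url to string"""
--     translate = {
--         '%22': '"',
--         '%27': "'",
--         '%2E': ".",
--         '%2F': '/'
--     }
--     ret = string
--     if ret is not None:
--         for k, v in translate.items():  # pylint: disable=C0103
--             ret = ret.replace(k, v)
--     return ret
-- ===== SOURCE B (Python) =====
-- def unurl(string: str):
--     """url to string"""
--     if string is None:
--         return None
--     translate = {
--         '%22': '"',
--         '%27': "'",
--         '%2E': ".",
--         '%2F': '/'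
--     }
--     out = []
--     i = 0
--     n = len(string)
--     while i < n:
--         chunk = string[i:i + 3]
--         if chunk in translate:
--             out.append(translate[chunk])
--             i += 3
--         else:
--             out.append(string[i])
--             i += 1
--     return ''.join(out)
-- ===== Notes on version B (the rewrite author's own statement) =====
-- stated objective: alternative
-- what changed: Replaces four sequential full str.replace passes with one left-to-right scan that looks each 3-char window up in the translate table (valid because key occurrences cannot overlap and the replacement characters never create new keys).
import Mathlib
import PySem

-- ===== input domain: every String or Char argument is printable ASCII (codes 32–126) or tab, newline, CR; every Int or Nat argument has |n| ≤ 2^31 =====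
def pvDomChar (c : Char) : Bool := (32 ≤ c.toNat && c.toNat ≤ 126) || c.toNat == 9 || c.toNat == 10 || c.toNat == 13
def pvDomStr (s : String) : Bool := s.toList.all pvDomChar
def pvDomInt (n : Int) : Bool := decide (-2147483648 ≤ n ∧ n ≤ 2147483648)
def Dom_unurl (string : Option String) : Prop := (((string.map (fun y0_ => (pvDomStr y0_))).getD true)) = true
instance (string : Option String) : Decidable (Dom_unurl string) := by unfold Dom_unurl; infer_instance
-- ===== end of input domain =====

-- B replaces A's four sequential str.replace passes with a single left-to-right scan
-- with a 3-char-window table lookup; equal output since key occurrences cannot overlap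
-- and the replacement characters never form new keys.

-- ===== PORT A =====
-- literal transliteration: ret = string; if not None, four str.replace passes in dict order
def unurl (string : Option String) : Option String :=
  match string with
  | none => none
  | some s =>
      let r1 := PySem.Str.replace s "%22" "\""
      let r2 := PySem.Str.replace r1 "%27" "'"
      let r3 := PySem.Str.replace r2 "%2E" "."
      let r4 := PySem.Str.replace r3 "%2F" "/"
      some r4

-- ===== PORT B =====
-- Source B's while loop: at each position look the 3-char window up in the table;
-- on a hit emit the mapped char and skip 3, else emit the char and advance 1.
def unurlAltGo : List Char → List Char
  | '%' :: '2' :: '2' :: t => '"' :: unurlAltGo t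
  | '%' :: '2' :: '7' :: t => '\'' :: unurlAltGo t
  | '%' :: '2' :: 'E' :: t => '.' :: unurlAltGo t
  | '%' :: '2' :: 'F' :: t => '/' :: unurlAltGo t
  | c :: t => c :: unurlAltGo t
  | [] => []

def unurl_alt (string : Option String) : Option String :=
  match string with
  | none => none
  | some s => some (String.ofList (unurlAltGo s.toList))

-- ===== PRECONDITION & SPEC =====
def Spec_unurl (string : Option String) (out : Option String) : Prop := out = unurl_alt string
instance (string : Option String) (out : Option String) : Decidable (Spec_unurl string out) := by unfold Spec_unurl; infer_instance

-- ===== CLAIM (what is proved, stated in full; the proofs are below) =====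
def Claim_equal_unurl : Prop := ∀ (string : Option String), Dom_unurl string → Spec_unurl string (unurl string)

-- ===== LEMMAS AND PROOFS =====

-- simple structural recursion equivalent to PySem.Chars.replace for nonempty `old`
def rep (old new : List Char) : List Char → List Char
  | [] => []
  | c :: t =>
      if old.isPrefixOf (c :: t) then new ++ rep old new (t.drop (old.length - 1))
      else c :: rep old new t
termination_by l => l.length
decreasing_by
  · simp
  · simp

theorem rep_nil (old new : List Char) : rep old new [] = [] := by simp [rep]

theorem rep_cons (old new : List Char) (c : Char) (t : List Char) :
    rep old new (c :: t) =
      if old.isPrefixOf (c :: t) then new ++ rep old new (t.drop (old.length - 1))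
      else c :: rep old new t := by
  rw [rep]

theorem go_eq_rep (old new : List Char) (hold : old ≠ []) :
    ∀ (fuel : Nat) (l acc : List Char), l.length ≤ fuel →
      PySem.Chars.replace.go old new fuel l acc = acc.reverse ++ rep old new l := by
  intro fuel
  induction fuel with
  | zero =>
      intro l acc h
      have : l = [] := List.eq_nil_of_length_eq_zero (Nat.le_zero.mp h)
      subst this
      simp [PySem.Chars.replace.go, rep_nil]
  | succ n ih =>
      intro l acc h
      match l with
      | [] => simp [PySem.Chars.replace.go, rep_nil]
      | c :: t =>
          rw [PySem.Chars.replace.go, rep_cons]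
          by_cases hp : old.isPrefixOf (c :: t)
          · simp only [hp, if_true]
            have hlen : 1 ≤ old.length := by
              cases old with
              | nil => exact absurd rfl hold
              | cons _ _ => simp
            have hdrop : List.drop old.length (c :: t) = t.drop (old.length - 1) := by
              cases old with
              | nil => exact absurd rfl hold
              | cons o os => simp
            rw [hdrop]
            have hle : (t.drop (old.length - 1)).length ≤ n := by
              simp at h ⊢
              omega
            rw [ih _ _ hle]
            simp
          · simp only [hp]
            have hle : t.length ≤ n := by simp at h; omega
            rw [ih _ _ hle]
            simp

theorem replace_eq_rep (old new l : List Char) (hold : old ≠ []) :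
    PySem.Chars.replace l old new = rep old new l := by
  rw [PySem.Chars.replace]
  have : old.isEmpty = false := by
    cases old with
    | nil => exact absurd rfl hold
    | cons a t => rfl
  rw [this]
  simpa using go_eq_rep old new hold l.length l [] (le_refl _)

-- pass-through: a char that does not start a match is copied
theorem rep_cons_no (old new : List Char) (c : Char) (t : List Char)
    (h : old.isPrefixOf (c :: t) = false) :
    rep old new (c :: t) = c :: rep old new t := by
  rw [rep_cons, h]; simp

-- the head of `rep old [v] l` is the head of l or v
theorem rep_head (old : List Char) (v : Char) (l : List Char) :
    (rep old [v] l).head? = l.head? ∨ (rep old [v] l).head? = some v := by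
  match l with
  | [] => left; simp [rep_nil]
  | c :: t =>
      rw [rep_cons]
      by_cases hp : old.isPrefixOf (c :: t)
      · right; simp [hp]
      · left; simp [hp]

-- abbreviations for A's four passes
def rep1 : List Char → List Char := rep ['%','2','2'] ['"']
def rep2 : List Char → List Char := rep ['%','2','7'] ['\'']
def rep3 : List Char → List Char := rep ['%','2','E'] ['.']
def rep4 : List Char → List Char := rep ['%','2','F'] ['/']

def chain (l : List Char) : List Char := rep4 (rep3 (rep2 (rep1 l)))

theorem head_ne_of_rep (old : List Char) (v : Char) (l : List Char) (d : Char)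
    (hl : l.head? ≠ some d) (hv : v ≠ d) : (rep old [v] l).head? ≠ some d := by
  rcases rep_head old v l with h | h
  · rw [h]; exact hl
  · rw [h]; simpa using hv

-- a key never matches when the first char differs
theorem not_prefix_head (k : Char) (ks : List Char) (c : Char) (m : List Char) (h : c ≠ k) :
    List.isPrefixOf (k :: ks) (c :: m) = false := by
  simp [List.isPrefixOf]
  intro h'
  exact absurd h'.symm h

-- key₂ `['%','2',k]` is not a prefix of '%' :: m when m.head? ≠ some '2'
theorem not_prefix_pct (k : Char) (m : List Char) (hm : m.head? ≠ some '2') :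
    (List.isPrefixOf ['%','2',k] ('%' :: m)) = false := by
  cases m with
  | nil => rfl
  | cons a t =>
      by_cases ha : a = '2'
      · exact absurd (by simp [ha]) hm
      · simp [List.isPrefixOf]
        intro h
        exact absurd h.symm ha

-- key `['%','2',k]` is not a prefix of '%' :: '2' :: m when m.head? ≠ some k
theorem not_prefix_pct2 (k : Char) (m : List Char) (hm : m.head? ≠ some k) :
    (List.isPrefixOf ['%','2',k] ('%' :: '2' :: m)) = false := by
  cases m with
  | nil => rfl
  | cons a t =>
      by_cases ha : a = k
      · exact absurd (by simp [ha]) hm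
      · simp [List.isPrefixOf]
        exact fun h => ha h.symm

-- single-step behaviour of the four passes
theorem rep_pass1 (k3 : Char) (v : List Char) (c : Char) (m : List Char) (h : c ≠ '%') :
    rep ['%','2',k3] v (c :: m) = c :: rep ['%','2',k3] v m := by
  apply rep_cons_no
  exact not_prefix_head '%' ['2',k3] c m h

theorem rep_pass_pct (k3 : Char) (v : List Char) (m : List Char) (hm : m.head? ≠ some '2') :
    rep ['%','2',k3] v ('%' :: m) = '%' :: rep ['%','2',k3] v m := by
  apply rep_cons_no
  exact not_prefix_pct k3 m hm

theorem rep_pass_pct2 (k3 : Char) (v : List Char) (m : List Char) (hm : m.head? ≠ some k3) :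
    rep ['%','2',k3] v ('%' :: '2' :: m) = '%' :: '2' :: rep ['%','2',k3] v m := by
  rw [rep_cons_no _ _ _ _ (not_prefix_pct2 k3 m hm), rep_pass1 k3 v '2' m (by decide)]

theorem rep_match (k3 : Char) (v : Char) (m : List Char) :
    rep ['%','2',k3] [v] ('%' :: '2' :: k3 :: m) = v :: rep ['%','2',k3] [v] m := by
  rw [rep_cons]
  simp [List.isPrefixOf]

-- the chain of A's four passes, one step at a time
theorem chain_nil : chain [] = [] := by
  simp [chain, rep1, rep2, rep3, rep4, rep_nil]

theorem chain_pass (c : Char) (m : List Char) (h : c ≠ '%') :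
    chain (c :: m) = c :: chain m := by
  unfold chain rep1 rep2 rep3 rep4
  rw [rep_pass1 _ _ _ _ h, rep_pass1 _ _ _ _ h, rep_pass1 _ _ _ _ h, rep_pass1 _ _ _ _ h]

theorem chain_pct (m : List Char) (hm : m.head? ≠ some '2') :
    chain ('%' :: m) = '%' :: chain m := by
  unfold chain rep1 rep2 rep3 rep4
  have h2 : (rep ['%','2','2'] ['"'] m).head? ≠ some '2' :=
    head_ne_of_rep _ _ _ _ hm (by decide)
  have h3 : (rep ['%','2','7'] ['\''] (rep ['%','2','2'] ['"'] m)).head? ≠ some '2' :=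
    head_ne_of_rep _ _ _ _ h2 (by decide)
  have h4 : (rep ['%','2','E'] ['.'] (rep ['%','2','7'] ['\''] (rep ['%','2','2'] ['"'] m))).head? ≠ some '2' :=
    head_ne_of_rep _ _ _ _ h3 (by decide)
  rw [rep_pass_pct _ _ _ hm, rep_pass_pct _ _ _ h2, rep_pass_pct _ _ _ h3, rep_pass_pct _ _ _ h4]

theorem chain_pct2 (m : List Char) (h2 : m.head? ≠ some '2') (h7 : m.head? ≠ some '7')
    (hE : m.head? ≠ some 'E') (hF : m.head? ≠ some 'F') :
    chain ('%' :: '2' :: m) = '%' :: '2' :: chain m := by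
  unfold chain rep1 rep2 rep3 rep4
  have g7 : (rep ['%','2','2'] ['"'] m).head? ≠ some '7' :=
    head_ne_of_rep _ _ _ _ h7 (by decide)
  have gE : (rep ['%','2','7'] ['\''] (rep ['%','2','2'] ['"'] m)).head? ≠ some 'E' :=
    head_ne_of_rep _ _ _ _ (head_ne_of_rep _ _ _ _ hE (by decide)) (by decide)
  have gF : (rep ['%','2','E'] ['.'] (rep ['%','2','7'] ['\''] (rep ['%','2','2'] ['"'] m))).head? ≠ some 'F' :=
    head_ne_of_rep _ _ _ _ (head_ne_of_rep _ _ _ _ (head_ne_of_rep _ _ _ _ hF (by decide)) (by decide)) (by decide)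
  rw [rep_pass_pct2 _ _ _ h2, rep_pass_pct2 _ _ _ g7, rep_pass_pct2 _ _ _ gE, rep_pass_pct2 _ _ _ gF]

theorem chain_k1 (m : List Char) : chain ('%' :: '2' :: '2' :: m) = '"' :: chain m := by
  unfold chain rep1 rep2 rep3 rep4
  rw [rep_match, rep_pass1 _ _ _ _ (by decide), rep_pass1 _ _ _ _ (by decide),
      rep_pass1 _ _ _ _ (by decide)]

theorem chain_k2 (m : List Char) : chain ('%' :: '2' :: '7' :: m) = '\'' :: chain m := by
  unfold chain rep1 rep2 rep3 rep4
  rw [rep_pass_pct2 '2' ['"'] ('7' :: m) (by simp),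
      rep_pass1 '2' ['"'] '7' m (by decide),
      rep_match '7' '\'' (rep ['%','2','2'] ['"'] m),
      rep_pass1 'E' ['.'] '\'' _ (by decide),
      rep_pass1 'F' ['/'] '\'' _ (by decide)]

theorem chain_k3 (m : List Char) : chain ('%' :: '2' :: 'E' :: m) = '.' :: chain m := by
  unfold chain rep1 rep2 rep3 rep4
  rw [rep_pass_pct2 '2' ['"'] ('E' :: m) (by simp),
      rep_pass1 '2' ['"'] 'E' m (by decide),
      rep_pass_pct2 '7' ['\''] ('E' :: rep ['%','2','2'] ['"'] m) (by simp),
      rep_pass1 '7' ['\''] 'E' _ (by decide),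
      rep_match 'E' '.' _,
      rep_pass1 'F' ['/'] '.' _ (by decide)]

theorem chain_k4 (m : List Char) : chain ('%' :: '2' :: 'F' :: m) = '/' :: chain m := by
  unfold chain rep1 rep2 rep3 rep4
  rw [rep_pass_pct2 '2' ['"'] ('F' :: m) (by simp),
      rep_pass1 '2' ['"'] 'F' m (by decide),
      rep_pass_pct2 '7' ['\''] ('F' :: rep ['%','2','2'] ['"'] m) (by simp),
      rep_pass1 '7' ['\''] 'F' _ (by decide),
      rep_pass_pct2 'E' ['.'] ('F' :: rep ['%','2','7'] ['\''] (rep ['%','2','2'] ['"'] m)) (by simp),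
      rep_pass1 'E' ['.'] 'F' _ (by decide),
      rep_match 'F' '/' _]

-- single-step behaviour of B's scan
theorem altGo_pass (c : Char) (m : List Char) (h : c ≠ '%') :
    unurlAltGo (c :: m) = c :: unurlAltGo m := by
  rw [unurlAltGo.eq_def]
  split <;> simp_all

theorem altGo_pct (d : Char) (m : List Char) (h : d ≠ '2') :
    unurlAltGo ('%' :: d :: m) = '%' :: unurlAltGo (d :: m) := by
  rw [unurlAltGo.eq_def]
  split <;> simp_all
  rename_i heq
  exact heq.1.symm

theorem altGo_pct2 (e : Char) (m : List Char) (h2 : e ≠ '2') (h7 : e ≠ '7')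
    (hE : e ≠ 'E') (hF : e ≠ 'F') :
    unurlAltGo ('%' :: '2' :: e :: m) = '%' :: '2' :: unurlAltGo (e :: m) := by
  rw [unurlAltGo.eq_def]
  split <;> simp_all
  rename_i heq
  obtain ⟨h1, h2⟩ := heq
  subst h2
  exact ⟨h1.symm, altGo_pass '2' (e :: m) (by decide)⟩

theorem chain_eq_altGo_bounded :
    ∀ (n : Nat) (l : List Char), l.length ≤ n → chain l = unurlAltGo l := by
  intro n
  induction n with
  | zero =>
      intro l h
      have : l = [] := List.eq_nil_of_length_eq_zero (Nat.le_zero.mp h)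
      subst this
      rw [chain_nil]; rfl
  | succ n ih =>
      intro l h
      match l with
      | [] => rw [chain_nil]; rfl
      | c :: m =>
          by_cases hc : c = '%'
          · subst hc
            match m with
            | [] =>
                rw [chain_pct [] (by simp), chain_nil]; rfl
            | d :: m =>
                by_cases hd : d = '2'
                · subst hd
                  match m with
                  | [] =>
                      rw [chain_pct2 [] (by simp) (by simp) (by simp) (by simp), chain_nil]; rfl
                  | e :: m =>
                      have hm : m.length ≤ n := by simp at h; omega
                      by_cases h2 : e = '2'
                      · subst h2; rw [chain_k1, ih m hm]; rfl
                      · by_cases h7 : e = '7'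
                        · subst h7; rw [chain_k2, ih m hm]; rfl
                        · by_cases hE : e = 'E'
                          · subst hE; rw [chain_k3, ih m hm]; rfl
                          · by_cases hF : e = 'F'
                            · subst hF; rw [chain_k4, ih m hm]; rfl
                            · rw [chain_pct2 (e :: m) (by simp [h2]) (by simp [h7]) (by simp [hE]) (by simp [hF]),
                                  altGo_pct2 e m h2 h7 hE hF,
                                  ih (e :: m) (by simp at h ⊢; omega)]
                · rw [chain_pct (d :: m) (by simp [hd]), altGo_pct d m hd,
                      ih (d :: m) (by simp at h ⊢; omega)]
          · rw [chain_pass c m hc, altGo_pass c m hc, ih m (by simp at h; omega)]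

theorem chain_eq_altGo (l : List Char) : chain l = unurlAltGo l :=
  chain_eq_altGo_bounded l.length l (le_refl _)

-- ===== VERDICT (by name: the statement is the Claim_ definition above) =====
theorem unurl_spec : Claim_equal_unurl := by
  intro string _
  unfold Spec_unurl unurl unurl_alt
  cases string with
  | none => rfl
  | some s =>
      simp only [PySem.Str.replace, String.toList_ofList]
      rw [replace_eq_rep _ _ _ (by decide), replace_eq_rep _ _ _ (by decide),
          replace_eq_rep _ _ _ (by decide), replace_eq_rep _ _ _ (by decide)]
      have := chain_eq_altGo s.toList
      unfold chain rep1 rep2 rep3 rep4 at this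
      have h22 : "%22".toList = ['%','2','2'] := by decide
      have h27 : "%27".toList = ['%','2','7'] := by decide
      have h2E : "%2E".toList = ['%','2','E'] := by decide
      have h2F : "%2F".toList = ['%','2','F'] := by decide
      have hq : "\"".toList = ['"'] := by decide
      have ha : "'".toList = ['\''] := by decide
      have hd : ".".toList = ['.'] := by decide
      have hs : "/".toList = ['/'] := by decide
      rw [h22, h27, h2E, h2F, hq, ha, hd, hs, this]
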